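-- pv_equiv track=rewrite | github.com/nkini/sarcasmdetectionontwitter | replicate_riloff_inverted_subsumption.py | clean_and_add
-- ===== SOURCE A (Python) =====
-- from collections import defaultdict
--
-- def clean_and_add(newset,oldset):
--
--     discard_pile = set()
--     combo = newset | oldset
--     combo_old = combo
--     combo = sort_by_len(combo)
--     keys = sorted(combo.keys(),reverse=True)
--
--     for i,k1 in enumerate(keys[:-1]):
--         for big in combo[k1]:
--             big = ' '.join(big)
--             if is_subsumed(big,combo,keys,i):
--                 discard_pile.add(tuple(big.split()))
--
--     res = combo_old - discard_pile
--
--     return res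
--
-- def is_subsumed(bigphrase,dict_of_tuples,keys,i):
--     for k2 in keys[i+1:]:
--         for small in dict_of_tuples[k2]:
--             small = ' '.join(small)
--             if small in bigphrase:
--                 return True
--     return False
--
-- def sort_by_len(set_of_tuples):
--     res = defaultdict(set)
--     for tup in set_of_tuples:
--         res[len(tup)].add(tup)
--     return res
-- ===== SOURCE B (Python) =====
-- def clean_and_add(newset, oldset):
--     combo = newset | oldset
--     joined = {p: ' '.join(p) for p in combo}
--     discard = {tuple(joined[p].split())
--                for p in combo
--                if any(len(q) < len(p) and joined[q] in joined[p] for q in combo)}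
--     return combo - discard
-- ===== Notes on version B (the rewrite author's own statement) =====
-- stated objective: simpler
-- what changed: B drops A's group-by-length dict, descending key sort and enumerate/slice walk over key groups, and instead precomputes one join table and builds the discard set in a single conditional pass that tests each phrase directly against every strictly-shorter phrase of the union.
import Mathlib
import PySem

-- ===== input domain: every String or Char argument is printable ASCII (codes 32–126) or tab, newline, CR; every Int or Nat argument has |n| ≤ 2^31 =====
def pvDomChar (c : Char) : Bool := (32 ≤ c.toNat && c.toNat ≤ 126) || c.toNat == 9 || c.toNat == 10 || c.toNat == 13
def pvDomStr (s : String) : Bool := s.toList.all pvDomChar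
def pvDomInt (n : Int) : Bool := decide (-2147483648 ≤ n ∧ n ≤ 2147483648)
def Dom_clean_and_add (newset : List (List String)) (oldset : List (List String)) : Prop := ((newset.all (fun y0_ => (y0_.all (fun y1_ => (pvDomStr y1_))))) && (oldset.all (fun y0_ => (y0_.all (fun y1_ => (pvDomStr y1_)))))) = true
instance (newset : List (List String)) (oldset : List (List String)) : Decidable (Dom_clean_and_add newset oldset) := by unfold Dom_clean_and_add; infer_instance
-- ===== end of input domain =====

-- B replaces A's group-by-length dict, descending key sort and per-key nested scans by one
-- precomputed join table and a single conditional pass building the discard set (objective: simpler).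
-- Inputs/outputs are Python sets (order-insensitive); they appear here as lists of distinct elements.

-- ===== PORT A =====
def sort_by_len (set_of_tuples : List (List String)) : PySem.Dict Int (List (List String)) :=
  set_of_tuples.foldl
    (fun res tup => res.insert ((tup.length : Int))
      (PySem.Set.add (res.getD ((tup.length : Int)) []) tup))
    PySem.Dict.empty

def is_subsumed (bigphrase : String) (dict_of_tuples : PySem.Dict Int (List (List String)))
    (keys : List Int) (i : Int) : Bool :=
  (PySem.List.slice keys (some (i + 1)) none).any (fun k2 =>
    (dict_of_tuples.getD k2 []).any (fun small =>
      PySem.Str.isIn (PySem.Str.join " " small) bigphrase))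

def clean_and_add (newset : List (List String)) (oldset : List (List String)) : List (List String) :=
  let combo := PySem.Set.union (PySem.Set.ofList newset) oldset
  let combo_old := combo
  let d := sort_by_len combo
  let keys := PySem.List.sorted d.keys (fun k => k) true
  let discard_pile :=
    (PySem.List.enumerate (PySem.List.slice keys none (some (-1)))).foldl
      (fun dp ik =>
        (d.getD ik.2 []).foldl
          (fun dp big =>
            let bigs := PySem.Str.join " " big
            if is_subsumed bigs d keys ik.1 then PySem.Set.add dp (PySem.Str.split₀ bigs)
            else dp)
          dp)
      PySem.Set.empty
  PySem.Set.diff combo_old discard_pile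

-- ===== PORT B =====
def clean_and_add_alt (newset : List (List String)) (oldset : List (List String)) : List (List String) :=
  let combo := PySem.Set.union (PySem.Set.ofList newset) oldset
  let joined := combo.foldl (fun j p => j.insert p (PySem.Str.join " " p))
    (PySem.Dict.empty : PySem.Dict (List String) String)
  let discard := combo.foldl
    (fun dis p =>
      if combo.any (fun q =>
          decide (q.length < p.length) && PySem.Str.isIn (joined.getD q "") (joined.getD p "")) then
        PySem.Set.add dis (PySem.Str.split₀ (joined.getD p ""))
      else dis)
    PySem.Set.empty
  PySem.Set.diff combo discard

-- ===== PRECONDITION & SPEC =====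
def Spec_clean_and_add (newset : List (List String)) (oldset : List (List String)) (out : List (List String)) : Prop := out = clean_and_add_alt newset oldset
instance (newset : List (List String)) (oldset : List (List String)) (out : List (List String)) : Decidable (Spec_clean_and_add newset oldset out) := by unfold Spec_clean_and_add; infer_instance

-- ===== CLAIM (what is proved, stated in full; the proofs are below) =====
def Claim_equal_clean_and_add : Prop := ∀ (newset : List (List String)) (oldset : List (List String)), Dom_clean_and_add newset oldset → Spec_clean_and_add newset oldset (clean_and_add newset oldset)

-- ===== LEMMAS AND PROOFS =====

-- membership in the groups built by sort_by_len
theorem pv_mem_sort_by_len_aux (l : List (List String)) (x : List String) (k : Int) :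
    ∀ (d : PySem.Dict Int (List (List String))),
      x ∈ (l.foldl (fun res tup => res.insert ((tup.length : Int))
            (PySem.Set.add (res.getD ((tup.length : Int)) []) tup)) d).getD k []
        ↔ x ∈ d.getD k [] ∨ (x ∈ l ∧ (x.length : Int) = k) := by
  induction l with
  | nil => intro d; simp
  | cons t l ih =>
    intro d
    rw [List.foldl_cons, ih]
    rw [PySem.Dict.getD_insert]
    by_cases hk : k = (t.length : Int)
    · subst hk
      rw [if_pos rfl, PySem.Set.mem_add]
      constructor
      · rintro (⟨hx | rfl⟩ | ⟨hxl, hlen⟩)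
        · exact Or.inl hx
        · exact Or.inr ⟨by simp, rfl⟩
        · exact Or.inr ⟨by simp [hxl], hlen⟩
      · rintro (hx | ⟨hxl, hlen⟩)
        · exact Or.inl (Or.inl hx)
        · rcases List.mem_cons.mp hxl with rfl | hxl
          · exact Or.inl (Or.inr rfl)
          · exact Or.inr ⟨hxl, hlen⟩
    · rw [if_neg hk]
      constructor
      · rintro (hx | ⟨hxl, hlen⟩)
        · exact Or.inl hx
        · exact Or.inr ⟨by simp [hxl], hlen⟩
      · rintro (hx | ⟨hxl, hlen⟩)
        · exact Or.inl hx
        · rcases List.mem_cons.mp hxl with rfl | hxl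
          · exact absurd hlen.symm (by simpa using hk)
          · exact Or.inr ⟨hxl, hlen⟩

theorem pv_mem_sort_by_len (combo : List (List String)) (x : List String) (k : Int) :
    x ∈ (sort_by_len combo).getD k [] ↔ x ∈ combo ∧ (x.length : Int) = k := by
  unfold sort_by_len
  rw [pv_mem_sort_by_len_aux]
  simp

theorem pv_keys_sort_by_len (combo : List (List String)) :
    (sort_by_len combo).keys = PySem.Set.ofList (combo.map (fun p => (p.length : Int))) := by
  unfold sort_by_len
  rw [PySem.Dict.keys_foldl_insert_key combo (fun tup => (tup.length : Int))
    (fun res tup => PySem.Set.add (res.getD ((tup.length : Int)) []) tup) PySem.Dict.empty]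
  rw [PySem.Dict.keys_empty, PySem.Set.update_nil_left]

-- generic membership through a foldl that conditionally adds
theorem pv_mem_foldl_step {β : Type} (l : List β)
    (step : PySem.Set (List String) → β → PySem.Set (List String))
    (P : β → List String → Prop)
    (hstep : ∀ (s : PySem.Set (List String)) (y : β), y ∈ l → ∀ (x : List String), x ∈ step s y ↔ x ∈ s ∨ P y x) :
    ∀ (s0 : PySem.Set (List String)) (x : List String),
      x ∈ l.foldl step s0 ↔ x ∈ s0 ∨ ∃ y ∈ l, P y x := by
  induction l with
  | nil => intro s0 x; simp
  | cons b l ih =>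
    intro s0 x
    rw [List.foldl_cons, ih (fun s y hy x => hstep s y (List.mem_cons_of_mem b hy) x),
      hstep s0 b (List.mem_cons_self) x]
    constructor
    · rintro (⟨hx | hp⟩ | ⟨y, hy, hp⟩)
      · exact Or.inl hx
      · exact Or.inr ⟨b, by simp, hp⟩
      · exact Or.inr ⟨y, by simp [hy], hp⟩
    · rintro (hx | ⟨y, hy, hp⟩)
      · exact Or.inl (Or.inl hx)
      · rcases List.mem_cons.mp hy with rfl | hy
        · exact Or.inl (Or.inr hp)
        · exact Or.inr ⟨y, hy, hp⟩

-- membership in enumerate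
theorem pv_mem_enumerate {α : Type} (xs : List α) (i : Int) (a : α) :
    ∀ s, (i, a) ∈ PySem.List.enumerate xs s ↔ ∃ j : Nat, ∃ hj : j < xs.length, i = s + j ∧ xs[j] = a := by
  induction xs with
  | nil => intro s; simp [PySem.List.enumerate]
  | cons x xs ih =>
    intro s
    simp only [PySem.List.enumerate, List.mem_cons, ih (s + 1)]
    constructor
    · rintro (h | ⟨j, hj, hi, hx⟩)
      · exact ⟨0, by simp, by simpa using congrArg Prod.fst h, by simpa using (congrArg Prod.snd h).symm⟩
      · refine ⟨j + 1, by simp; omega, ?_, by simpa using hx⟩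
        push_cast
        omega
    · rintro ⟨j, hj, hi, hx⟩
      cases j with
      | zero => exact Or.inl (by simp at hi hx; simp [hi, hx])
      | succ j =>
        right
        refine ⟨j, by simp at hj; omega, ?_, by simpa using hx⟩
        push_cast at hi ⊢
        omega

-- joined dict of B
theorem pv_joined_getD_aux (l : List (List String)) :
    ∀ (d : PySem.Dict (List String) String) (q : List String),
      (l.foldl (fun j p => j.insert p (PySem.Str.join " " p)) d).getD q ""
        = if q ∈ l then PySem.Str.join " " q else d.getD q "" := by
  induction l with
  | nil => intro d q; simp
  | cons p l ih =>
    intro d q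
    rw [List.foldl_cons, ih, PySem.Dict.getD_insert]
    by_cases hql : q ∈ l
    · simp [hql]
    · by_cases hqp : q = p
      · subst hqp; simp [hql]
      · simp [hql, hqp]

-- slice keys none (some (-1)) is dropLast
theorem pv_slice_dropLast {α : Type} (xs : List α) :
    PySem.List.slice xs none (some (-1)) = xs.dropLast := by
  simp only [PySem.List.slice, PySem.List.clampIdx, List.drop_zero, List.dropLast_eq_take,
    Nat.sub_zero]
  rw [if_pos (by norm_num : (-1 : Int) < 0)]
  by_cases h : (xs.length : Int) + (-1) < 0
  · have h0 : xs.length = 0 := by omega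
    simp [h0]
  · rw [if_neg h]
    congr 1
    omega

-- strictly descending characterisation of the sorted key list
theorem pv_mem_drop_of_sorted (L : List Int) (hpair : L.Pairwise (fun a b => a > b)) (j : Nat) (hj : j < L.length)
    (x : Int) : x ∈ L.drop (j + 1) ↔ x ∈ L ∧ x < L[j] := by
  rw [List.pairwise_iff_getElem] at hpair
  constructor
  · intro hx
    rw [List.mem_iff_getElem] at hx
    obtain ⟨m, hm, rfl⟩ := hx
    have hlen : (List.drop (j + 1) L).length = L.length - (j + 1) := by simp
    have hmm : j + 1 + m < L.length := by omega
    rw [List.getElem_drop]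
    exact ⟨List.getElem_mem _, hpair j (j + 1 + m) hj hmm (by omega)⟩
  · rintro ⟨hx, hlt⟩
    rw [List.mem_iff_getElem] at hx
    obtain ⟨m, hm, rfl⟩ := hx
    have hjm : j < m := by
      rcases Nat.lt_trichotomy j m with h1 | h1 | h1
      · exact h1
      · subst h1; exact absurd hlt (lt_irrefl _)
      · exact absurd hlt (not_lt.mpr (le_of_lt (hpair m j hm hj h1)))
    rw [List.mem_iff_getElem]
    refine ⟨m - (j + 1), by simp; omega, ?_⟩
    rw [List.getElem_drop]
    congr 1
    omega

-- the central fact: both discard piles have the same members, so both diffs agree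
theorem pv_main (newset oldset : List (List String)) :
    clean_and_add newset oldset = clean_and_add_alt newset oldset := by
  simp only [clean_and_add, clean_and_add_alt]
  set combo := PySem.Set.union (PySem.Set.ofList newset) oldset with hcombo
  set d := sort_by_len combo with hd
  set L := PySem.List.sorted d.keys (fun k => k) true with hL
  -- facts about the sorted key list L
  have hmemL : ∀ k : Int, k ∈ L ↔ ∃ p ∈ combo, (p.length : Int) = k := by
    intro k
    rw [hL, (PySem.List.sorted_perm d.keys (fun k => k) true).mem_iff, hd,
      pv_keys_sort_by_len, PySem.Set.mem_ofList]
    simp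
  have hnodupL : L.Nodup := by
    refine (PySem.List.sorted_perm d.keys (fun k => k) true).symm.nodup ?_
    rw [hd, pv_keys_sort_by_len]
    exact PySem.Set.nodup_ofList _
  have hgt : L.Pairwise (fun a b => a > b) := by
    have h1 := PySem.List.sorted_pairwise_rev d.keys (fun k => k)
    rw [← hL] at h1
    exact (h1.and hnodupL).imp (fun h => lt_of_le_of_ne h.1 h.2.symm)
  -- A's discard pile as a predicate
  have hdpA : ∀ x : List String,
      (x ∈ (PySem.List.enumerate (PySem.List.slice L none (some (-1)))).foldl
        (fun dp ik => (d.getD ik.2 []).foldl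
          (fun dp big =>
            if is_subsumed (PySem.Str.join " " big) d L ik.1 then
              PySem.Set.add dp (PySem.Str.split₀ (PySem.Str.join " " big))
            else dp) dp)
        PySem.Set.empty
      ↔ ∃ big ∈ combo, (∃ q ∈ combo, q.length < big.length ∧
          PySem.Str.isIn (PySem.Str.join " " q) (PySem.Str.join " " big) = true) ∧
          PySem.Str.split₀ (PySem.Str.join " " big) = x) := by
    intro x
    rw [pv_slice_dropLast]
    rw [pv_mem_foldl_step _ _
      (fun ik y => ∃ big ∈ d.getD ik.2 [],
        is_subsumed (PySem.Str.join " " big) d L ik.1 = true ∧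
        PySem.Str.split₀ (PySem.Str.join " " big) = y) ?hout PySem.Set.empty x]
    case hout =>
      intro s ik _hik y
      rw [pv_mem_foldl_step _ _
        (fun big z => is_subsumed (PySem.Str.join " " big) d L ik.1 = true ∧
          PySem.Str.split₀ (PySem.Str.join " " big) = z) ?hin s y]
      case hin =>
        intro s' big _hbig z
        by_cases hc : is_subsumed (PySem.Str.join " " big) d L ik.1 = true
        · rw [if_pos hc, PySem.Set.mem_add]
          constructor
          · rintro (h | h)
            · exact Or.inl h
            · exact Or.inr ⟨hc, h.symm⟩
          · rintro (h | ⟨-, h⟩)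
            · exact Or.inl h
            · exact Or.inr h.symm
        · rw [if_neg hc]
          constructor
          · exact Or.inl
          · rintro (h | ⟨h, -⟩)
            · exact h
            · exact absurd h hc
    constructor
    · -- discarded → comes from some subsumed phrase of combo
      rintro (h | ⟨ik, hik, big, hbig, hsub, hsplit⟩)
      · exact absurd h (by simp [PySem.Set.empty])
      · obtain ⟨j, hj, hi, hLj⟩ := (pv_mem_enumerate _ _ _ 0).mp hik
        have hbigc := (pv_mem_sort_by_len combo big ik.2).mp hbig
        unfold is_subsumed at hsub
        rw [hi] at hsub
        have hjlt : j < L.length := by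
          have := hj; rw [List.length_dropLast] at this; omega
        have htn : ((0 : Int) + (j : Int) + 1).toNat = j + 1 := by omega
        have hslice : PySem.List.slice L (some ((0 : Int) + (j : Int) + 1)) none = L.drop (j + 1) := by
          rw [PySem.List.slice_from L (by omega), htn]
        rw [hslice] at hsub
        simp only [List.any_eq_true] at hsub
        obtain ⟨k2, hk2, small, hsmall, hin⟩ := hsub
        rw [pv_mem_drop_of_sorted L hgt j hjlt] at hk2
        have hsmallc := (pv_mem_sort_by_len combo small k2).mp hsmall
        have hlen2 : ik.2 = L[j] := by
          rw [← hLj, List.getElem_dropLast]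
        refine ⟨big, hbigc.1, ⟨small, hsmallc.1, ?_, hin⟩, hsplit⟩
        have : (small.length : Int) < (big.length : Int) := by
          rw [hsmallc.2, hbigc.2, hlen2]
          exact hk2.2
        exact_mod_cast this
    · -- a subsumed phrase of combo → its re-tokenization is discarded
      rintro ⟨big, hbigc, ⟨q, hq, hqlen, hin⟩, hsplit⟩
      right
      have hnL : (big.length : Int) ∈ L := (hmemL _).mpr ⟨big, hbigc, rfl⟩
      have hqL : (q.length : Int) ∈ L := (hmemL _).mpr ⟨q, hq, rfl⟩
      obtain ⟨j, hj, hLj⟩ := List.mem_iff_getElem.mp hnL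
      obtain ⟨j', hj', hLj'⟩ := List.mem_iff_getElem.mp hqL
      have hqn : (q.length : Int) < (big.length : Int) := by exact_mod_cast hqlen
      have hjj' : j < j' := by
        rcases Nat.lt_trichotomy j j' with h1 | h1 | h1
        · exact h1
        · exfalso
          subst h1
          rw [hLj'] at hLj
          omega
        · exfalso
          have := (List.pairwise_iff_getElem.mp hgt) j' j hj' hj h1
          rw [hLj, hLj'] at this
          omega
      have hjd : j < L.dropLast.length := by
        rw [List.length_dropLast]; omega
      refine ⟨((j : Int), L[j]), ?_, big, ?_, ?_, hsplit⟩
      · exact (pv_mem_enumerate _ _ _ 0).mpr ⟨j, hjd, by omega, by rw [List.getElem_dropLast]⟩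
      · exact (pv_mem_sort_by_len combo big L[j]).mpr ⟨hbigc, by rw [hLj]⟩
      · unfold is_subsumed
        have htn : ((j : Int) + 1).toNat = j + 1 := by omega
        have hslice : PySem.List.slice L (some ((j : Int) + 1)) none = L.drop (j + 1) := by
          rw [PySem.List.slice_from L (by omega), htn]
        simp only [hslice, List.any_eq_true]
        refine ⟨(q.length : Int), ?_, q, ?_, hin⟩
        · rw [pv_mem_drop_of_sorted L hgt j hj]
          exact ⟨hqL, by rw [hLj]; exact hqn⟩
        · exact (pv_mem_sort_by_len combo q _).mpr ⟨hq, rfl⟩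
  -- B's discard set as the same predicate
  have hdpB : ∀ x : List String,
      (x ∈ combo.foldl
        (fun dis p =>
          if combo.any (fun q =>
              decide (q.length < p.length) &&
                PySem.Str.isIn
                  ((combo.foldl (fun j p => j.insert p (PySem.Str.join " " p)) PySem.Dict.empty).getD q "")
                  ((combo.foldl (fun j p => j.insert p (PySem.Str.join " " p)) PySem.Dict.empty).getD p "")) then
            PySem.Set.add dis
              (PySem.Str.split₀
                ((combo.foldl (fun j p => j.insert p (PySem.Str.join " " p)) PySem.Dict.empty).getD p ""))
          else dis)
        PySem.Set.empty
      ↔ ∃ big ∈ combo, (∃ q ∈ combo, q.length < big.length ∧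
          PySem.Str.isIn (PySem.Str.join " " q) (PySem.Str.join " " big) = true) ∧
          PySem.Str.split₀ (PySem.Str.join " " big) = x) := by
    intro x
    have hjoin : ∀ r ∈ combo,
        ((combo.foldl (fun j p => j.insert p (PySem.Str.join " " p)) PySem.Dict.empty).getD r "")
          = PySem.Str.join " " r := by
      intro r hr
      rw [pv_joined_getD_aux combo PySem.Dict.empty r]
      rw [if_pos hr]
    rw [pv_mem_foldl_step combo _
      (fun p z => (combo.any (fun q =>
          decide (q.length < p.length) &&
            PySem.Str.isIn (PySem.Str.join " " q) (PySem.Str.join " " p)) = true) ∧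
          PySem.Str.split₀ (PySem.Str.join " " p) = z) ?hstep PySem.Set.empty x]
    case hstep =>
      intro s p hp z
      rw [hjoin p hp]
      have hg : (combo.any (fun q =>
            decide (q.length < p.length) &&
              PySem.Str.isIn
                ((combo.foldl (fun j p => j.insert p (PySem.Str.join " " p)) PySem.Dict.empty).getD q "")
                (PySem.Str.join " " p)))
          = (combo.any (fun q =>
            decide (q.length < p.length) &&
              PySem.Str.isIn (PySem.Str.join " " q) (PySem.Str.join " " p))) := by
        apply Bool.eq_iff_iff.mpr
        simp only [List.any_eq_true]
        constructor
        · rintro ⟨q, hq, h⟩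
          exact ⟨q, hq, by rwa [hjoin q hq] at h⟩
        · rintro ⟨q, hq, h⟩
          exact ⟨q, hq, by rwa [hjoin q hq]⟩
      rw [hg]
      by_cases hc : (combo.any (fun q =>
          decide (q.length < p.length) &&
            PySem.Str.isIn (PySem.Str.join " " q) (PySem.Str.join " " p))) = true
      · rw [if_pos hc, PySem.Set.mem_add]
        constructor
        · rintro (h | h)
          · exact Or.inl h
          · exact Or.inr ⟨hc, h.symm⟩
        · rintro (h | ⟨-, h⟩)
          · exact Or.inl h
          · exact Or.inr h.symm
      · rw [if_neg hc]
        constructor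
        · exact Or.inl
        · rintro (h | ⟨h, -⟩)
          · exact h
          · exact absurd h hc
    simp only [List.any_eq_true, Bool.and_eq_true, decide_eq_true_eq]
    constructor
    · rintro (h | h)
      · exact absurd h (by simp [PySem.Set.empty])
      · exact h
    · exact Or.inr
  -- both sides are set differences over the same combo: compare the filters
  show PySem.Set.diff combo _ = PySem.Set.diff combo _
  unfold PySem.Set.diff
  refine List.filter_congr ?_
  intro x hxc
  congr 1
  apply Bool.eq_iff_iff.mpr
  rw [PySem.Set.contains_iff, PySem.Set.contains_iff, hdpA, hdpB]

-- ===== VERDICT (by name: the statement is the Claim_ definition above) =====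
theorem clean_and_add_spec : Claim_equal_clean_and_add := by
  intro newset oldset _hdom
  unfold Spec_clean_and_add
  exact pv_main newset oldset
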